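-- pv_equiv track=rewrite | github.com/adenm82/ProjectEuler | Problem054.py | hightwo
-- ===== SOURCE A (Python) =====
-- def hightwo(x):
--     dict={}
--     arr=[]
--     nums="23456789TJQKA"
--     for y in range(len(x)):
--         if y%3==0:
--             arr.append(int(nums.find(x[y])))
--             if x[y] in dict:
--                 dict[int(nums.find(x[y]))]+=1
--             else:
--                 dict[int(nums.find(x[y]))]=1
--     most=0
--     for z in arr:
--         if dict[z]<2:
--             most=max(most,z)
--     return most
-- ===== SOURCE B (Python) =====
-- def hightwo(x):
--     nums = "23456789TJQKA"
--     most = 0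
--     for y in range(0, len(x), 3):
--         most = max(most, nums.find(x[y]))
--     return most
-- ===== Notes on version B (the rewrite author's own statement) =====
-- stated objective: simpler
-- what changed: A's dict-counting is dead code (it tests a char against int keys, so every count is 1 and the <2 filter always passes); B drops the dict and the intermediate list entirely and keeps a single running maximum over every third character, stepping the range by 3 instead of filtering y%3==0.
import Mathlib
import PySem

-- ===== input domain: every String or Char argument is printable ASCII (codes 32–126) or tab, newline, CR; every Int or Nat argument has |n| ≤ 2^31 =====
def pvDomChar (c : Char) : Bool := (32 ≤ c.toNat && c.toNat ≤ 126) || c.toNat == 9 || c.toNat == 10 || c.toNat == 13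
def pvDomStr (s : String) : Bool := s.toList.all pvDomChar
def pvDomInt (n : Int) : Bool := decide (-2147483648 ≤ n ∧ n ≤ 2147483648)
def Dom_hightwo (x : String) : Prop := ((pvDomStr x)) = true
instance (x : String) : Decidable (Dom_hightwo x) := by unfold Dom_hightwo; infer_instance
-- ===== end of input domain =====

-- B drops A's dead dict-counting (its membership test compares a char with int keys, so every
-- count stays 1 and the <2 filter always passes) and keeps one running maximum over a step-3 range: simpler.

-- ===== PORT A =====
def hightwo (x : String) : Int :=
  let nums := "23456789TJQKA"
  let st := (PySem.List.pyRange 0 (PySem.Str.len x) 1).foldl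
    (fun (st : PySem.Dict Int Int × List Int) y =>
      if PySem.Int.mod y 3 = 0 then
        -- x[y]: y ranges over 0..len-1 so pyGet? is always some; getD is exact here
        let c : Char := (PySem.Str.pyGet? x y).getD ' '
        let k : Int := PySem.Chars.find nums.toList [c]
        -- Python's `x[y] in dict` compares the Char x[y] with the Int keys — always False
        let d := if False then st.1.insert k (st.1.getD k 0 + 1) else st.1.insert k 1
        (d, st.2 ++ [k])
      else st)
    (PySem.Dict.empty, [])
  st.2.foldl (fun most z =>
    -- dict[z]: z was always inserted with value 1, so getD with default 0 is exact
    if PySem.Dict.getD st.1 z 0 < 2 then max most z else most) 0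

-- ===== PORT B =====
def hightwo_alt (x : String) : Int :=
  let nums := "23456789TJQKA"
  (PySem.List.pyRange 0 (PySem.Str.len x) 3).foldl
    (fun most y => max most (PySem.Chars.find nums.toList [(PySem.Str.pyGet? x y).getD ' '])) 0

-- ===== PRECONDITION & SPEC =====
def Spec_hightwo (x : String) (out : Int) : Prop := out = hightwo_alt x
instance (x : String) (out : Int) : Decidable (Spec_hightwo x out) := by unfold Spec_hightwo; infer_instance

-- ===== CLAIM (what is proved, stated in full; the proofs are below) =====
def Claim_equal_hightwo : Prop := ∀ (x : String), Dom_hightwo x → Spec_hightwo x (hightwo x)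

-- ===== LEMMAS AND PROOFS =====

-- the rank of the character at index y of x (shared shape of both ports' loop bodies)
def pvRank (x : String) (y : Int) : Int :=
  PySem.Chars.find "23456789TJQKA".toList [(PySem.Str.pyGet? x y).getD ' ']

-- A's first loop, as a function of the index list
def pvLoopA (x : String) (ys : List Int) (st : PySem.Dict Int Int × List Int) :
    PySem.Dict Int Int × List Int :=
  ys.foldl
    (fun (st : PySem.Dict Int Int × List Int) y =>
      if PySem.Int.mod y 3 = 0 then
        (st.1.insert (pvRank x y) 1, st.2 ++ [pvRank x y])
      else st) st

-- stepping a step-3 range's upper bound by one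
lemma pvRange3_succ (m : Nat) :
    PySem.List.pyRange 0 ((m : Int) + 1) 3 =
      PySem.List.pyRange 0 (m : Int) 3 ++ (if m % 3 = 0 then [(m : Int)] else []) := by
  rw [PySem.List.pyRange_of_pos 0 ((m : Int) + 1) (by norm_num),
      PySem.List.pyRange_of_pos 0 (m : Int) (by norm_num)]
  have h1 : (0 : Int) < (m : Int) + 1 := by positivity
  have hc1 : (((m : Int) + 1 - 0 + 3 - 1) / 3).toNat = m / 3 + 1 := by omega
  have hc0 : (if (0 : Int) < (m : Int) then (((m : Int) - 0 + 3 - 1) / 3).toNat else 0)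
      = (m + 2) / 3 := by split_ifs with h <;> omega
  rw [if_pos h1, hc1, hc0]
  by_cases h3 : m % 3 = 0
  · have : (m + 2) / 3 = m / 3 := by omega
    rw [if_pos h3, this, List.range_succ, List.map_append]
    simp only [List.map_cons, List.map_nil]
    congr 2
    omega
  · have : (m + 2) / 3 = m / 3 + 1 := by omega
    rw [if_neg h3, this, List.append_nil]

-- invariant + shape of A's first loop over range(0, m)
lemma pvLoopA_spec (x : String) (m : Nat) :
    ∀ (d : PySem.Dict Int Int) (arr : List Int),
      (∀ k, d.getD k 0 = 0 ∨ d.getD k 0 = 1) →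
      (∀ k, (pvLoopA x (PySem.List.pyRange 0 (m : Int) 1) (d, arr)).1.getD k 0 = 0 ∨
            (pvLoopA x (PySem.List.pyRange 0 (m : Int) 1) (d, arr)).1.getD k 0 = 1) ∧
      (pvLoopA x (PySem.List.pyRange 0 (m : Int) 1) (d, arr)).2 =
        arr ++ (PySem.List.pyRange 0 (m : Int) 3).map (pvRank x) := by
  induction m with
  | zero =>
    intro d arr hP
    constructor
    · simpa [pvLoopA, show PySem.List.pyRange 0 0 1 = [] from by decide] using hP
    · simp [pvLoopA, show PySem.List.pyRange 0 0 1 = [] from by decide,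
            show PySem.List.pyRange 0 0 3 = [] from by decide]
  | succ m ih =>
    intro d arr hP
    have hcast : ((m + 1 : Nat) : Int) = (m : Int) + 1 := by push_cast; ring
    have hsplit : PySem.List.pyRange 0 ((m : Int) + 1) 1 =
        PySem.List.pyRange 0 (m : Int) 1 ++ [(m : Int)] :=
      PySem.List.pyRange_one_succ_right (show (0:Int) ≤ (m:Int) by omega)
    rw [hcast, hsplit, pvRange3_succ]
    unfold pvLoopA
    rw [List.foldl_append]
    obtain ⟨ihP, ihArr⟩ := ih d arr hP
    unfold pvLoopA at ihP ihArr
    have hmod : PySem.Int.mod (m : Int) 3 = ((m % 3 : Nat) : Int) := by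
      exact_mod_cast PySem.Int.mod_natCast m 3
    by_cases h3 : m % 3 = 0
    · have hmz : PySem.Int.mod (m : Int) 3 = 0 := by rw [hmod, h3]; norm_num
      rw [if_pos h3]
      simp only [List.foldl_cons, List.foldl_nil, if_pos hmz]
      constructor
      · intro k
        rw [PySem.Dict.getD_insert]
        split_ifs
        · right; rfl
        · exact ihP k
      · rw [ihArr, List.map_append, List.append_assoc]
        rfl
    · have hmz : ¬ PySem.Int.mod (m : Int) 3 = 0 := by
        rw [hmod]; exact_mod_cast h3
      rw [if_neg h3]
      simp only [List.foldl_cons, List.foldl_nil, if_neg hmz, List.append_nil]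
      exact ⟨ihP, ihArr⟩

-- ===== VERDICT (by name: the statement is the Claim_ definition above) =====
theorem hightwo_spec : Claim_equal_hightwo := by
  intro x _
  show hightwo x = hightwo_alt x
  unfold hightwo hightwo_alt
  simp only [PySem.Str.len_eq, if_false]
  obtain ⟨hP, hArr⟩ := pvLoopA_spec x x.toList.length PySem.Dict.empty []
    (fun k => Or.inl (by simp [PySem.Dict.getD, PySem.Dict.get?, PySem.Dict.empty]))
  unfold pvLoopA at hP hArr
  simp only [pvRank] at hP hArr
  rw [hArr]
  refine Eq.trans (PySem.List.foldl_congr_mem _ _ (fun most z => max most z) 0 ?_) ?_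
  · intro acc z _
    rcases hP z with h | h <;> rw [if_pos (by rw [h]; norm_num)]
  · rw [List.nil_append, List.foldl_map]
    simp [pvRank]
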